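-- pv_equiv track=rewrite | github.com/jordanplanders/cedar_util | data_obj/plotting_objects.py | isotope_ylabel
-- ===== SOURCE A (Python) =====
-- def isotope_ylabel(isotope):
--     isotope_labels = {
--         'd18O': r'$\delta^{18}O$',
--         'dD': r'$\delta D$',
--         'd_excess': r'$d$-excess',
--         'deltaT': r'$\Delta T$',
--         'tanom': r'Temp Anomaly',
--         # 'tsi_anom': r'TSI Anomaly (W/m²)',
--     }
--     for key in isotope_labels.keys():
--         if key in isotope:
--             isotope = isotope.replace(key, isotope_labels[key])
--     return isotope
-- ===== SOURCE B (Python) =====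
-- def isotope_ylabel(isotope):
--     labels = [
--         ('d18O', r'$\delta^{18}O$'),
--         ('dD', r'$\delta D$'),
--         ('d_excess', r'$d$-excess'),
--         ('deltaT', r'$\Delta T$'),
--         ('tanom', r'Temp Anomaly'),
--     ]
--     out = []
--     rest = isotope
--     while rest:
--         for key, rep in labels:
--             if rest.startswith(key):
--                 out.append(rep)
--                 rest = rest[len(key):]
--                 break
--         else:
--             out.append(rest[0])
--             rest = rest[1:]
--     return ''.join(out)
-- ===== Notes on version B (the rewrite author's own statement) =====
-- stated objective: alternative
-- what changed: B rewrites the label in a single left-to-right scan that tries the keys in A's dict order at each position (emitting the label and skipping the key on a match), instead of A's five sequential whole-string replace passes; equal because no key overlaps another and no replacement text contains or completes a key.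
import Mathlib
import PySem

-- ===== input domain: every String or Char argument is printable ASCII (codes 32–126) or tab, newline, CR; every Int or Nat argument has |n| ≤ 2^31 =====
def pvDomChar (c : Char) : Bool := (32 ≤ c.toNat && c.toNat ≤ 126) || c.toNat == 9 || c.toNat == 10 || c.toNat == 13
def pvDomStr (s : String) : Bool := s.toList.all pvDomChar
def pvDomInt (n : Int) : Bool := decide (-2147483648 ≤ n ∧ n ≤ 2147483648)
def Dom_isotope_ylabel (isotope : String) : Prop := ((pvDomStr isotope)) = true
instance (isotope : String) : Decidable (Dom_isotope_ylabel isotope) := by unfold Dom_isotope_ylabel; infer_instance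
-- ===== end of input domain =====

set_option maxRecDepth 10000


-- B rewrites the label in ONE left-to-right scan trying the keys in A's dict order at each
-- position, instead of A's five sequential whole-string replace passes (objective: alternative).

-- ===== PORT A =====
def pvLabelsA : PySem.Dict String String :=
  PySem.Dict.ofList
    [("d18O", "$\\delta^{18}O$"), ("dD", "$\\delta D$"), ("d_excess", "$d$-excess"),
     ("deltaT", "$\\Delta T$"), ("tanom", "Temp Anomaly")]

-- for key in isotope_labels.keys(): if key in isotope: isotope = isotope.replace(key, isotope_labels[key])
-- (getD with "" is Python's d[key]; every key iterated is present, so the default is never used)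
def isotope_ylabel (isotope : String) : String :=
  pvLabelsA.keys.foldl
    (fun iso key =>
      if PySem.Str.isIn key iso then PySem.Str.replace iso key (pvLabelsA.getD key "") else iso)
    isotope

-- ===== PORT B =====
def pvLabelsB : List (List Char × List Char) :=
  [("d18O".toList, "$\\delta^{18}O$".toList), ("dD".toList, "$\\delta D$".toList),
   ("d_excess".toList, "$d$-excess".toList), ("deltaT".toList, "$\\Delta T$".toList),
   ("tanom".toList, "Temp Anomaly".toList)]

-- the while-loop of Source B: at each position emit the first matching key's label (and skip the
-- key) or copy one character; the joined pieces are the concatenation built here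
def pvScan (ks : List (List Char × List Char)) : List Char → List Char
  | [] => []
  | c :: t =>
    match ks.find? (fun p => p.1.isPrefixOf (c :: t)) with
    | some p => p.2 ++ pvScan ks (List.drop (p.1.length - 1) t)
    | none => c :: pvScan ks t
termination_by l => l.length
decreasing_by
  · simp only [List.length_cons, List.length_drop]; omega
  · simp

def isotope_ylabel_alt (isotope : String) : String :=
  String.ofList (pvScan pvLabelsB isotope.toList)

-- ===== PRECONDITION & SPEC =====
def Spec_isotope_ylabel (isotope : String) (out : String) : Prop := out = isotope_ylabel_alt isotope
instance (isotope : String) (out : String) : Decidable (Spec_isotope_ylabel isotope out) := by unfold Spec_isotope_ylabel; infer_instance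

-- ===== CLAIM (what is proved, stated in full; the proofs are below) =====
def Claim_equal_isotope_ylabel : Prop := ∀ (isotope : String), Dom_isotope_ylabel isotope → Spec_isotope_ylabel isotope (isotope_ylabel isotope)

-- ===== LEMMAS AND PROOFS =====

-- single-key replacement as a structural scan (the shape of Python str.replace)
def pvRep (old new : List Char) : List Char → List Char
  | [] => []
  | c :: t =>
    if old.isPrefixOf (c :: t) then new ++ pvRep old new (List.drop (old.length - 1) t)
    else c :: pvRep old new t
termination_by l => l.length
decreasing_by
  · simp only [List.length_cons, List.length_drop]; omega
  · simp

theorem pvGo_eq (old new : List Char) (hold : old ≠ []) :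
    ∀ (fuel : Nat) (l acc : List Char), l.length ≤ fuel →
      PySem.Chars.replace.go old new fuel l acc = acc.reverse ++ pvRep old new l := by
  intro fuel
  induction fuel with
  | zero =>
    intro l acc hl
    have : l = [] := List.eq_nil_of_length_eq_zero (Nat.le_zero.mp hl)
    subst this
    simp [PySem.Chars.replace.go, pvRep]
  | succ n ih =>
    intro l acc hl
    match l with
    | [] => simp [PySem.Chars.replace.go, pvRep]
    | c :: t =>
      rw [PySem.Chars.replace.go]
      by_cases hpre : old.isPrefixOf (c :: t)
      · rw [if_pos hpre]
        obtain ⟨d, old', rfl⟩ : ∃ d old', old = d :: old' := by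
          cases old with
          | nil => exact absurd rfl hold
          | cons d old' => exact ⟨d, old', rfl⟩
        have hdrop : List.drop (d :: old').length (c :: t) = List.drop old'.length t := by
          simp
        have hlen : (List.drop old'.length t).length ≤ n := by
          simp only [List.length_drop]
          simp only [List.length_cons] at hl
          omega
        rw [hdrop, ih _ _ hlen]
        rw [pvRep, if_pos hpre]
        simp
      · rw [if_neg hpre]
        have hlen : t.length ≤ n := by simp only [List.length_cons] at hl; omega
        rw [ih _ _ hlen]
        rw [pvRep, if_neg hpre]
        simp

theorem pvReplace_eq (s old new : List Char) (hold : old ≠ []) :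
    PySem.Chars.replace s old new = pvRep old new s := by
  rw [PySem.Chars.replace]
  rw [if_neg (by simp [List.isEmpty_iff, hold])]
  simpa using pvGo_eq old new hold s.length s [] (le_refl _)

-- replace with no occurrence is the identity
theorem pvRep_id (k r : List Char) : ∀ s : List Char, ¬ k <:+: s → pvRep k r s = s := by
  intro s
  induction s with
  | nil => intro _; rw [pvRep]
  | cons c t ih =>
    intro h
    rw [pvRep, if_neg (fun hp => h (List.isPrefixOf_iff_prefix.mp hp).isInfix)]
    rw [ih (fun hi => h (hi.trans (List.infix_cons (List.infix_refl t))))]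

-- a prefix of an append is a prefix of, or extends, the left part
theorem pvPrefixCases {α : Type} {k a x : List α} (h : k <+: a ++ x) : k <+: a ∨ a <+: k := by
  obtain ⟨t, ht⟩ := h
  rcases List.append_eq_append_iff.mp ht with ⟨as, h1, _⟩ | ⟨bs, h1, _⟩
  · exact Or.inl ⟨as, h1.symm⟩
  · exact Or.inr ⟨bs, h1.symm⟩

-- pvRep k r commutes over a block w in which k can start no match
theorem pvCommRep (k r : List Char) :
    ∀ (w x : List Char),
      (∀ m, m < w.length → ¬ k <+: w.drop m ∧ ¬ w.drop m <+: k) →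
      pvRep k r (w ++ x) = w ++ pvRep k r x := by
  intro w
  induction w with
  | nil => intro x _; simp
  | cons c w' ih =>
    intro x hw
    have hc : ¬ k <+: (c :: w') ++ x := by
      intro hk
      rcases pvPrefixCases hk with h | h
      · exact (hw 0 (by simp)).1 (by simpa using h)
      · exact (hw 0 (by simp)).2 (by simpa using h)
    rw [List.cons_append, pvRep, if_neg (fun hp => hc (by simpa using List.isPrefixOf_iff_prefix.mp hp))]
    rw [ih x (fun m hm => by simpa using hw (m + 1) (by simpa using hm))]
    simp

-- pvRep consumes its own key at the front
theorem pvRepConsume (k r : List Char) (hk : k ≠ []) (x : List Char) :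
    pvRep k r (k ++ x) = r ++ pvRep k r x := by
  obtain ⟨c, k', rfl⟩ : ∃ c k', k = c :: k' := by
    cases k with
    | nil => exact absurd rfl hk
    | cons c k' => exact ⟨c, k', rfl⟩
  rw [List.cons_append, pvRep,
    if_pos (List.isPrefixOf_iff_prefix.mpr (by rw [← List.cons_append]; exact List.prefix_append _ _))]
  simp

def pvPipe (M : List (List Char × List Char)) (s : List Char) : List Char :=
  M.foldl (fun s p => pvRep p.1 p.2 s) s

theorem pvPipe_cons (p : List Char × List Char) (M : List (List Char × List Char)) (s : List Char) :
    pvPipe (p :: M) s = pvPipe M (pvRep p.1 p.2 s) := rfl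

theorem pvPipe_append (M N : List (List Char × List Char)) (s : List Char) :
    pvPipe (M ++ N) s = pvPipe N (pvPipe M s) := by
  simp [pvPipe, List.foldl_append]

theorem pvPipe_concat (M : List (List Char × List Char)) (p : List Char × List Char) (s : List Char) :
    pvPipe (M ++ [p]) s = pvRep p.1 p.2 (pvPipe M s) := by
  simp [pvPipe, List.foldl_append]

theorem pvPipe_nil (M : List (List Char × List Char)) : pvPipe M [] = [] := by
  induction M with
  | nil => rfl
  | cons p M ih => rw [pvPipe, List.foldl_cons, pvRep]; exact ih

theorem pvPipeComm (M : List (List Char × List Char)) (w : List Char)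
    (h : ∀ q ∈ M, ∀ x, pvRep q.1 q.2 (w ++ x) = w ++ pvRep q.1 q.2 x) :
    ∀ x, pvPipe M (w ++ x) = w ++ pvPipe M x := by
  induction M with
  | nil => intro x; rfl
  | cons q M ih =>
    intro x
    rw [pvPipe, List.foldl_cons, h q (by simp), ← pvPipe]
    exact ih (fun q' hq' x' => h q' (by simp [hq']) x') _

-- the scan cannot create a key occurrence: a prefix made of characters that no emitted
-- label starts with must already be a prefix of the input
theorem pvScanNoCreate (ks : List (List Char × List Char)) (hne : ∀ p ∈ ks, p.2 ≠ []) :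
    ∀ (w sub : List Char), (∀ c ∈ sub, ∀ p ∈ ks, p.2.head? ≠ some c) →
      sub <+: pvScan ks w → sub <+: w := by
  intro w
  induction w using pvScan.induct ks with
  | case1 =>
    intro sub _ h
    rw [pvScan] at h
    simpa using List.prefix_nil.mp h
  | case2 c t p hfind ih =>
    intro sub hchar hpre
    simp only [pvScan, hfind] at hpre
    match sub with
    | [] => exact List.nil_prefix
    | s0 :: sub' =>
      exfalso
      have hp : p ∈ ks := List.mem_of_find?_eq_some hfind
      obtain ⟨d, r', hr⟩ : ∃ d r', p.2 = d :: r' := by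
        cases hterm : p.2 with
        | nil => exact absurd hterm (hne p hp)
        | cons d r' => exact ⟨d, r', rfl⟩
      rw [hr] at hpre
      have : s0 = d := (List.cons_prefix_cons.mp (by simpa using hpre)).1
      exact hchar s0 (by simp) p hp (by rw [hr, this]; rfl)
  | case3 c t hfind ih =>
    intro sub hchar hpre
    simp only [pvScan, hfind] at hpre
    match sub with
    | [] => exact List.nil_prefix
    | s0 :: sub' =>
      obtain ⟨h1, h2⟩ := List.cons_prefix_cons.mp hpre
      exact List.cons_prefix_cons.mpr
        ⟨h1, ih sub' (fun ch hch => hchar ch (by simp [hch])) h2⟩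

-- hypotheses on the label table (all decidable, checked by `decide` at instantiation):
-- keys and labels nonempty; no key starts inside another key; distinct keys are
-- prefix-incomparable; no later key can start inside an earlier label; no character of a
-- later key is the first character of an earlier label.
theorem pvMain (L : List (List Char × List Char))
    (hk : ∀ p ∈ L, p.1 ≠ []) (hr : ∀ p ∈ L, p.2 ≠ [])
    (hself : ∀ p ∈ L, ∀ q ∈ L, ∀ s ∈ p.1.tails, s ≠ [] → s ≠ p.1 →
      ¬ q.1 <+: s ∧ ¬ s <+: q.1)
    (hpair : List.Pairwise (fun p q => ¬ q.1 <+: p.1 ∧ ¬ p.1 <+: q.1) L)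
    (hrep : List.Pairwise (fun p q =>
      (∀ s ∈ p.2.tails, s ≠ [] → ¬ q.1 <+: s ∧ ¬ s <+: q.1) ∧
      (q.1.all (fun c => p.2.head? != some c)) = true) L) :
    ∀ (n : Nat) (u : List Char), u.length ≤ n → ∀ L', L' <+: L → pvPipe L' u = pvScan L' u := by
  intro n
  induction n with
  | zero =>
    intro u hu L' _
    have : u = [] := List.eq_nil_of_length_eq_zero (Nat.le_zero.mp hu)
    subst this
    rw [pvPipe_nil, pvScan]
  | succ n ihn =>
    intro u hu L' hL'
    match u with
    | [] => rw [pvPipe_nil, pvScan]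
    | c :: t =>
      cases hfind : L'.find? (fun p => p.1.isPrefixOf (c :: t)) with
      | none =>
        -- no key matches at this position: the head character passes through every stage
        have hnomatch : ∀ p ∈ L', ¬ p.1 <+: c :: t := by
          intro p hp hpre
          exact absurd (List.isPrefixOf_iff_prefix.mpr hpre)
            (by simpa using List.find?_eq_none.mp hfind p hp)
        have hstep : ∀ L'', L'' <+: L' → pvPipe L'' (c :: t) = c :: pvPipe L'' t := by
          intro L''
          induction L'' using List.reverseRecOn with
          | nil => intro _; rfl
          | append_singleton M p ihM =>
            intro hM
            have hMpre : M <+: L' := (List.prefix_append M [p]).trans hM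
            have hMfold : pvPipe M t = pvScan M t :=
              ihn t (by simpa using hu) M (hMpre.trans hL')
            rw [pvPipe_concat, ihM hMpre]
            have hpmem : p ∈ L' := hM.sublist.mem (by simp)
            have hnp : ¬ p.1 <+: c :: pvScan M t := by
              intro hpre
              obtain ⟨d, k', hk'⟩ : ∃ d k', p.1 = d :: k' := by
                cases hterm : p.1 with
                | nil => exact absurd hterm (hk p (hL'.sublist.mem hpmem))
                | cons d k' => exact ⟨d, k', rfl⟩
              rw [hk'] at hpre
              obtain ⟨hd, hk'pre⟩ := List.cons_prefix_cons.mp hpre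
              -- the tail of the key is a prefix of the scan output, hence of t itself
              have hMpL : M ++ [p] <+: L := hM.trans hL'
              have hpw : List.Pairwise (fun p q =>
                  (∀ s ∈ p.2.tails, s ≠ [] → ¬ q.1 <+: s ∧ ¬ s <+: q.1) ∧
                  (q.1.all (fun c => p.2.head? != some c)) = true) (M ++ [p]) :=
                hrep.sublist hMpL.sublist
              have hchar : ∀ ch ∈ k', ∀ x ∈ M, x.2.head? ≠ some ch := by
                intro ch hch x hx
                have hxp := (List.pairwise_append.mp hpw).2.2 x hx p (by simp)
                have := List.all_eq_true.mp hxp.2 ch (by rw [hk']; exact List.mem_cons_of_mem _ hch)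
                simpa using this
              have hMne : ∀ x ∈ M, x.2 ≠ [] := fun x hx =>
                hr x (hMpL.sublist.mem (by simp [hx]))
              have hk't : k' <+: t :=
                pvScanNoCreate M hMne t k' hchar (hMfold ▸ hk'pre)
              exact hnomatch p hpmem (by rw [hk']; exact List.cons_prefix_cons.mpr ⟨hd, hk't⟩)
            rw [hMfold, pvRep, if_neg (fun hp' => hnp (List.isPrefixOf_iff_prefix.mp hp')),
              ← hMfold, pvPipe_concat]
        rw [hstep L' List.prefix_rfl, pvScan, hfind,
          ihn t (by simpa using hu) L' hL']
      | some p₀ =>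
        -- the first matching key: every earlier stage commutes over it, its own stage
        -- consumes it, every later stage commutes over its label
        obtain ⟨hp₀pre', Lpre, Lpost, hsplit, hprev⟩ := List.find?_eq_some_iff_append.mp hfind
        have hp₀pre : p₀.1 <+: c :: t := List.isPrefixOf_iff_prefix.mp hp₀pre'
        have hp₀L : p₀ ∈ L := hL'.sublist.mem (by rw [hsplit]; simp)
        have hp₀ne : p₀.1 ≠ [] := hk p₀ hp₀L
        obtain ⟨t₀, ht₀⟩ := hp₀pre
        have hLpw : List.Pairwise (fun p q => ¬ q.1 <+: p.1 ∧ ¬ p.1 <+: q.1) L' :=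
          hpair.sublist hL'.sublist
        have hRpw : List.Pairwise (fun p q =>
            (∀ s ∈ p.2.tails, s ≠ [] → ¬ q.1 <+: s ∧ ¬ s <+: q.1) ∧
            (q.1.all (fun c => p.2.head? != some c)) = true) L' := hrep.sublist hL'.sublist
        rw [hsplit] at hLpw hRpw
        -- stages before p₀ commute over the key p₀.1
        have hcomm1 : ∀ q ∈ Lpre, ∀ x, pvRep q.1 q.2 (p₀.1 ++ x) = p₀.1 ++ pvRep q.1 q.2 x := by
          intro q hq x
          apply pvCommRep
          intro m hm
          match m with
          | 0 =>
            have := (List.pairwise_append.mp hLpw).2.2 q hq p₀ (by simp)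
            simpa using ⟨this.2, this.1⟩
          | m + 1 =>
            have hqL : q ∈ L := hL'.sublist.mem (by rw [hsplit]; simp [hq])
            have hlen : (m + 1) < p₀.1.length := by
              simpa using hm
            refine hself p₀ hp₀L q hqL (p₀.1.drop (m + 1))
              ((List.mem_tails _ _).mpr (List.drop_suffix _ _)) ?_ ?_
            · intro hnil
              have := congrArg List.length hnil
              simp only [List.length_drop, List.length_nil] at this
              omega
            · intro heq
              have := congrArg List.length heq
              simp only [List.length_drop] at this
              omega
        -- stages after p₀ commute over the label p₀.2
        have hcomm2 : ∀ q ∈ Lpost, ∀ x, pvRep q.1 q.2 (p₀.2 ++ x) = p₀.2 ++ pvRep q.1 q.2 x := by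
          intro q hq x
          apply pvCommRep
          intro m hm
          have := (List.pairwise_append.mp hLpw)
          have h2 := (List.pairwise_append.mp hRpw).2.1
          have h3 := (List.pairwise_cons.mp h2).1 q hq
          refine h3.1 (p₀.2.drop m) ((List.mem_tails _ _).mpr (List.drop_suffix _ _)) ?_
          intro hnil
          have := congrArg List.length hnil
          simp only [List.length_drop, List.length_nil] at this
          omega
        have ht₀len : t₀.length ≤ n := by
          have := congrArg List.length ht₀
          simp only [List.length_cons, List.length_append] at this
          have hl1 : 1 ≤ p₀.1.length := by
            cases hterm : p₀.1 with
            | nil => exact absurd hterm hp₀ne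
            | cons _ _ => simp
          simp only [List.length_cons] at hu
          omega
        calc pvPipe L' (c :: t)
            = pvPipe Lpost (pvRep p₀.1 p₀.2 (pvPipe Lpre (p₀.1 ++ t₀))) := by
              rw [hsplit, ← ht₀, pvPipe_append, pvPipe_cons]
          _ = pvPipe Lpost (pvRep p₀.1 p₀.2 (p₀.1 ++ pvPipe Lpre t₀)) := by
              rw [pvPipeComm Lpre p₀.1 hcomm1]
          _ = pvPipe Lpost (p₀.2 ++ pvRep p₀.1 p₀.2 (pvPipe Lpre t₀)) := by
              rw [pvRepConsume p₀.1 p₀.2 hp₀ne]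
          _ = p₀.2 ++ pvPipe Lpost (pvRep p₀.1 p₀.2 (pvPipe Lpre t₀)) := by
              rw [pvPipeComm Lpost p₀.2 hcomm2]
          _ = p₀.2 ++ pvPipe L' t₀ := by
              rw [hsplit, pvPipe_append, pvPipe_cons]
          _ = p₀.2 ++ pvScan L' t₀ := by rw [ihn t₀ ht₀len L' hL']
          _ = pvScan L' (c :: t) := by
              rw [pvScan, hfind]
              congr 1
              congr 1
              -- drop (|p₀.1| - 1) t = t₀
              obtain ⟨d, k', hk'⟩ : ∃ d k', p₀.1 = d :: k' := by
                cases hterm : p₀.1 with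
                | nil => exact absurd hterm hp₀ne
                | cons d k' => exact ⟨d, k', rfl⟩
              rw [hk'] at ht₀
              simp only [List.cons_append, List.cons.injEq] at ht₀
              rw [hk']
              simp only [List.length_cons, Nat.add_sub_cancel, ← ht₀.2, List.drop_left]

-- bridge for one pass of A: the guarded Str.replace is pvRep on the character lists
theorem pvStepA (s k r : String) (hk : k.toList ≠ []) :
    (if PySem.Str.isIn k s then PySem.Str.replace s k r else s).toList =
      pvRep k.toList r.toList s.toList := by
  cases hin : PySem.Str.isIn k s with
  | true =>
    rw [if_pos rfl, PySem.Str.toList_replace, pvReplace_eq _ _ _ hk]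
  | false =>
    rw [if_neg (by simp)]
    rw [pvRep_id _ _ _ ((PySem.Chars.isIn_eq_false_iff _ _).mp (by simpa [PySem.Str.isIn] using hin))]

theorem pvA_toList (iso : String) :
    (isotope_ylabel iso).toList = pvPipe pvLabelsB iso.toList := by
  have hkeys : pvLabelsA.keys = ["d18O", "dD", "d_excess", "deltaT", "tanom"] := by decide
  rw [isotope_ylabel, hkeys]
  simp only [List.foldl_cons, List.foldl_nil]
  rw [pvPipe]
  simp only [List.foldl_cons, List.foldl_nil, pvLabelsB]
  rw [pvStepA _ _ _ (by decide), pvStepA _ _ _ (by decide), pvStepA _ _ _ (by decide),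
    pvStepA _ _ _ (by decide), pvStepA _ _ _ (by decide)]
  rfl

-- ===== VERDICT (by name: the statement is the Claim_ definition above) =====
theorem isotope_ylabel_spec : Claim_equal_isotope_ylabel := by
  intro iso _
  unfold Spec_isotope_ylabel
  have h : (isotope_ylabel iso).toList = (isotope_ylabel_alt iso).toList := by
    rw [pvA_toList, isotope_ylabel_alt, String.toList_ofList]
    exact pvMain pvLabelsB (by decide) (by decide) (by decide) (by decide) (by decide)
      iso.toList.length iso.toList (le_refl _) pvLabelsB List.prefix_rfl

  calc isotope_ylabel iso = String.ofList (isotope_ylabel iso).toList := String.ofList_toList.symm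
    _ = String.ofList (isotope_ylabel_alt iso).toList := by rw [h]
    _ = isotope_ylabel_alt iso := String.ofList_toList
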